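-- pv_equiv track=rewrite | github.com/matt-mulligan/pypoker | src/pypoker/engine/hand_solver/functions/outs.py | _outs_tb_full_house
-- ===== SOURCE A (Python) =====
-- from typing import List, Dict, Union
--
-- def _outs_tb_full_house(tiebreakers: Dict) -> str:
--     """
--     Private method to determine which player would have the stronger full house hand. given the drawn cards.
--
--     :param tiebreakers: dictionary of each players tiebreak information for this draw.
--     :param hole_cards: dictionary of each players hole cards
--     :param board_cards: List of the board cards that have been dealt
--     :param drawn_cards: List of cards that would be drawn in this scenario
--
--     :return: Name of the winning player. if a tie occurs, then return a TIE(<PLAYER_NAMES>) where PLAYER_NAMES is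
--              a comma-separated list of the players who have tied
--     """
--
--     max_trips = max([tiebreaker[0] for tiebreaker in tiebreakers.values()])
--     max_trips_players = [
--         player
--         for player, tiebreaker in tiebreakers.items()
--         if tiebreaker[0] == max_trips
--     ]
--
--     if len(max_trips_players) == 1:
--         return max_trips_players[0]
--
--     max_pair = max(
--         [
--             tiebreaker[1]
--             for player, tiebreaker in tiebreakers.items()
--             if player in max_trips_players
--         ]
--     )
--     max_pair_players = [
--         player
--         for player, tiebreaker in tiebreakers.items()
--         if tiebreaker[1] == max_pair and player in max_trips_players
--     ]
--
--     return (
--         max_pair_players[0]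
--         if len(max_pair_players) == 1
--         else f"TIE({','.join(max_pair_players)})"
--     )
-- ===== SOURCE B (Python) =====
-- def _outs_tb_full_house(tiebreakers):
--     best = max(t[:2] for t in tiebreakers.values())
--     winners = [p for p, t in tiebreakers.items() if t[:2] == best]
--     return winners[0] if len(winners) == 1 else f"TIE({','.join(winners)})"
-- ===== Notes on version B (the rewrite author's own statement) =====
-- stated objective: simpler
-- what changed: A's two-stage max-then-filter on trips followed by max-then-filter on pairs is replaced by one lexicographic max over the 2-prefixes of the tiebreaker lists followed by a single filter.
import Mathlib
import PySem

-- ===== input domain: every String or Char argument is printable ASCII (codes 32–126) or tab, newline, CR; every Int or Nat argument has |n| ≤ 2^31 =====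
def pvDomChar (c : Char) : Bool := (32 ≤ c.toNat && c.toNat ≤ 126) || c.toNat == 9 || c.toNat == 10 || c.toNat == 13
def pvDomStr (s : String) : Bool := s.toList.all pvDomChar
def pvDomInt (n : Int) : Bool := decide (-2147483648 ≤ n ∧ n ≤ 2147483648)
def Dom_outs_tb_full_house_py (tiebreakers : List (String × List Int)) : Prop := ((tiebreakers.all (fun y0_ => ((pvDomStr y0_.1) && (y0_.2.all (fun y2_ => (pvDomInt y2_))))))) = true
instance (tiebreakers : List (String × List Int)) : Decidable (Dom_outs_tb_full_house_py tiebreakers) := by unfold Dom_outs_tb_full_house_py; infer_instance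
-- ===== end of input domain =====

-- B replaces A's two-stage max/filter/max/filter by one lexicographic max over the
-- 2-prefixes of the tiebreakers followed by a single filter (objective: simpler).

-- ===== PORT A =====
def outs_tb_full_house_py (tiebreakers : List (String × List Int)) : String :=
  let max_trips := (PySem.List.max? ((tiebreakers.map Prod.snd).map
      (fun t => (PySem.List.pyGet? t 0).getD 0)) (fun x => x)).getD 0
  let max_trips_players := (tiebreakers.filter
      (fun pt => (PySem.List.pyGet? pt.2 0).getD 0 == max_trips)).map Prod.fst
  if max_trips_players.length == 1 then (PySem.List.pyGet? max_trips_players 0).getD "" else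
  let max_pair := (PySem.List.max? ((tiebreakers.filter
      (fun pt => max_trips_players.contains pt.1)).map
      (fun pt => (PySem.List.pyGet? pt.2 1).getD 0)) (fun x => x)).getD 0
  let max_pair_players := (tiebreakers.filter
      (fun pt => ((PySem.List.pyGet? pt.2 1).getD 0 == max_pair) && max_trips_players.contains pt.1)).map Prod.fst
  if max_pair_players.length == 1 then (PySem.List.pyGet? max_pair_players 0).getD ""
  else "TIE(" ++ PySem.Str.join "," max_pair_players ++ ")"

-- ===== PORT B =====
def outs_tb_full_house_py_alt (tiebreakers : List (String × List Int)) : String :=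
  let best := (PySem.List.max? ((tiebreakers.map Prod.snd).map
      (fun t => PySem.List.slice t none (some 2))) (fun t => t)).getD []
  let winners := (tiebreakers.filter
      (fun pt => PySem.List.slice pt.2 none (some 2) == best)).map Prod.fst
  if winners.length == 1 then (PySem.List.pyGet? winners 0).getD ""
  else "TIE(" ++ PySem.Str.join "," winners ++ ")"

-- ===== PRECONDITION & SPEC =====
-- first component of an entry's tiebreaker list (Python's tiebreaker[0])
def pvFirst_outs (pt : String × List Int) : Int := (PySem.List.pyGet? pt.2 0).getD 0

-- Pre_ excludes: the empty dict (A raises ValueError at max of an empty list), dicts with an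
-- empty tiebreaker list (A raises IndexError), dicts where two players tie for the maximal
-- first component while some tiebreaker list has fewer than two entries (A raises IndexError
-- in its pair stage), and association lists with duplicate player names, which do not
-- represent a Python dict.
def Pre_outs_tb_full_house_py (tiebreakers : List (String × List Int)) : Prop :=
  tiebreakers ≠ [] ∧ (∀ pt ∈ tiebreakers, pt.2 ≠ []) ∧
  (tiebreakers.map Prod.fst).Nodup ∧
  ((∃ pt ∈ tiebreakers, ∃ qt ∈ tiebreakers, pt.1 ≠ qt.1 ∧ pvFirst_outs pt = pvFirst_outs qt ∧
      ∀ rt ∈ tiebreakers, pvFirst_outs rt ≤ pvFirst_outs pt)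
    → ∀ pt ∈ tiebreakers, 2 ≤ pt.2.length)
instance (tiebreakers : List (String × List Int)) : Decidable (Pre_outs_tb_full_house_py tiebreakers) := by
  unfold Pre_outs_tb_full_house_py; infer_instance

def pvWitness_outs_tb_full_house_py : (List (String × List Int)) := [("a", [3, 2]), ("b", [2, 5])]

def Spec_outs_tb_full_house_py (tiebreakers : List (String × List Int)) (out : String) : Prop := out = outs_tb_full_house_py_alt tiebreakers
instance (tiebreakers : List (String × List Int)) (out : String) : Decidable (Spec_outs_tb_full_house_py tiebreakers out) := by unfold Spec_outs_tb_full_house_py; infer_instance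

-- ===== CLAIM (what is proved, stated in full; the proofs are below) =====
def Claim_equal_outs_tb_full_house_py : Prop := ∀ (tiebreakers : List (String × List Int)), Dom_outs_tb_full_house_py tiebreakers → Pre_outs_tb_full_house_py tiebreakers → Spec_outs_tb_full_house_py tiebreakers (outs_tb_full_house_py tiebreakers)

-- ===== LEMMAS AND PROOFS =====

-- lexicographic-order facts used to pin down the maximal 2-prefix
theorem pv_le_head {a b : Int} {u v : List Int} (h : (a :: u : List Int) ≤ b :: v) : a ≤ b := by
  refine le_of_not_gt (fun hba => not_lt_of_ge h ?_)
  exact List.Lex.rel hba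

theorem pv_le_tail {a : Int} {u v : List Int} (h : (a :: u : List Int) ≤ a :: v) : u ≤ v := by
  by_contra h'
  exact not_lt_of_ge h (List.Lex.cons (lt_of_not_ge h'))

-- the default (core) list order and Mathlib's lexicographic LinearOrder give the same max?
theorem pv_max?_lex (xs : List (List Int)) :
    PySem.List.max? xs (fun t => t)
      = @PySem.List.max? _ _ List.instLinearOrder.toLT LinearOrder.toDecidableLT xs (fun t => t) := by
  congr 1

-- max? facts transported to the default core list order used by the ports
theorem pv_lexmax_isMax {xs : List (List Int)} {m : List Int}
    (h : PySem.List.max? xs (fun t => t) = some m) : ∀ y ∈ xs, y ≤ m := by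
  rw [pv_max?_lex] at h
  exact PySem.List.max?_isMax h

theorem pv_lexmax_mem {xs : List (List Int)} {m : List Int}
    (h : PySem.List.max? xs (fun t => t) = some m) : m ∈ xs := PySem.List.max?_mem h

theorem outs_main (tb : List (String × List Int)) (hpre : Pre_outs_tb_full_house_py tb) :
    outs_tb_full_house_py tb = outs_tb_full_house_py_alt tb := by
  obtain ⟨hne, hnn, hnd, hcond⟩ := hpre
  -- distinct entries of tb have distinct keys, so a key determines its entry
  have hkeys : ∀ pt ∈ tb, ∀ qt ∈ tb, pt.1 = qt.1 → pt = qt := by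
    have hp : tb.Pairwise (fun a b : String × List Int => a.1 ≠ b.1) := List.pairwise_map.mp hnd
    have hsym : Symmetric (fun a b : String × List Int => a.1 ≠ b.1) := fun a b h => h.symm
    intro pt hpt qt hqt hk
    by_contra hne'
    exact (List.Pairwise.forall hsym hp) hpt hqt hne' hk
  -- index / slice facts on a non-empty tiebreaker list
  have hg0head : ∀ (pt : String × List Int) (c : Int) (t1 : List Int), pt.2 = c :: t1 →
      (PySem.List.pyGet? pt.2 0).getD 0 = c := by
    intro pt c t1 h; rw [h]; simp [PySem.List.pyGet?, PySem.List.pyIdx?]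
  have hg1second : ∀ (pt : String × List Int) (c d : Int) (t2 : List Int), pt.2 = c :: d :: t2 →
      (PySem.List.pyGet? pt.2 1).getD 0 = d := by
    intro pt c d t2 h; rw [h]; simp [PySem.List.pyGet?, PySem.List.pyIdx?]
  have hs2cons : ∀ (pt : String × List Int) (c : Int) (t1 : List Int), pt.2 = c :: t1 →
      PySem.List.slice pt.2 none (some 2) = c :: t1.take 1 := by
    intro pt c t1 h; rw [h]; simp [pysem]
  have hs2two : ∀ (pt : String × List Int) (c d : Int) (t2 : List Int), pt.2 = c :: d :: t2 →
      PySem.List.slice pt.2 none (some 2) = [c, d] := by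
    intro pt c d t2 h; rw [h]; simp [pysem]
  -- the maximal first component m
  have hFmap : (tb.map Prod.snd).map (fun t => (PySem.List.pyGet? t 0).getD 0)
      = tb.map (fun pt => (PySem.List.pyGet? pt.2 0).getD 0) := by
    rw [List.map_map]; rfl
  obtain ⟨m, hm⟩ : ∃ m, PySem.List.max?
      (tb.map (fun pt => (PySem.List.pyGet? pt.2 0).getD 0)) (fun x => x) = some m := by
    cases e : PySem.List.max? (tb.map (fun pt => (PySem.List.pyGet? pt.2 0).getD 0)) (fun x => x) with
    | none => rw [PySem.List.max?_eq_none_iff] at e; simp only [List.map_eq_nil_iff] at e; exact absurd e hne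
    | some m => exact ⟨m, rfl⟩
  have hm_max : ∀ pt ∈ tb, (PySem.List.pyGet? pt.2 0).getD 0 ≤ m := by
    intro pt hpt
    exact PySem.List.max?_isMax hm _ (List.mem_map_of_mem hpt)
  obtain ⟨pt0, hpt0_tb, hpt0_m⟩ : ∃ pt0 ∈ tb, (PySem.List.pyGet? pt0.2 0).getD 0 = m := by
    obtain ⟨pt0, h1, h2⟩ := List.mem_map.mp (PySem.List.max?_mem hm)
    exact ⟨pt0, h1, h2⟩
  -- the maximal 2-prefix best
  have hSmap : (tb.map Prod.snd).map (fun t => PySem.List.slice t none (some 2))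
      = tb.map (fun pt => PySem.List.slice pt.2 none (some 2)) := by
    rw [List.map_map]; rfl
  obtain ⟨best, hb⟩ : ∃ best, PySem.List.max?
      (tb.map (fun pt => PySem.List.slice pt.2 none (some 2))) (fun t => t) = some best := by
    cases e : PySem.List.max? (tb.map (fun pt => PySem.List.slice pt.2 none (some 2))) (fun t => t) with
    | none => rw [PySem.List.max?_eq_none_iff] at e; simp only [List.map_eq_nil_iff] at e; exact absurd e hne
    | some b => exact ⟨b, rfl⟩
  have hb_max : ∀ pt ∈ tb, PySem.List.slice pt.2 none (some 2) ≤ best := by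
    intro pt hpt
    exact pv_lexmax_isMax hb _ (List.mem_map_of_mem hpt)
  obtain ⟨q, hq_tb, hq_best⟩ : ∃ q ∈ tb, PySem.List.slice q.2 none (some 2) = best := by
    obtain ⟨q, h1, h2⟩ := List.mem_map.mp (pv_lexmax_mem hb)
    exact ⟨q, h1, h2⟩
  -- the head of best is m
  obtain ⟨c, w, hq2⟩ := List.exists_cons_of_ne_nil (hnn q hq_tb)
  have hq_g0 : (PySem.List.pyGet? q.2 0).getD 0 = c := hg0head q c w hq2
  have hbest_cons : best = c :: w.take 1 := by rw [← hq_best, hs2cons q c w hq2]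
  obtain ⟨c0, w0, hpt02⟩ := List.exists_cons_of_ne_nil (hnn pt0 hpt0_tb)
  have hc_m : c = m := by
    have h1 : c ≤ m := hq_g0 ▸ hm_max q hq_tb
    have h2 : m ≤ c := by
      have h3 := hb_max pt0 hpt0_tb
      rw [hs2cons pt0 c0 w0 hpt02, hbest_cons] at h3
      have hc0 : c0 = m := by have := hg0head pt0 c0 w0 hpt02; rw [this] at hpt0_m; omega
      rw [hc0] at h3
      exact pv_le_head h3
    omega
  -- unfold the two ports
  show
    (let max_trips := (PySem.List.max? ((tb.map Prod.snd).map
        (fun t => (PySem.List.pyGet? t 0).getD 0)) (fun x => x)).getD 0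
     let max_trips_players := (tb.filter
        (fun pt => (PySem.List.pyGet? pt.2 0).getD 0 == max_trips)).map Prod.fst
     if max_trips_players.length == 1 then (PySem.List.pyGet? max_trips_players 0).getD "" else
     let max_pair := (PySem.List.max? ((tb.filter
        (fun pt => max_trips_players.contains pt.1)).map
        (fun pt => (PySem.List.pyGet? pt.2 1).getD 0)) (fun x => x)).getD 0
     let max_pair_players := (tb.filter
        (fun pt => ((PySem.List.pyGet? pt.2 1).getD 0 == max_pair) && max_trips_players.contains pt.1)).map Prod.fst
     if max_pair_players.length == 1 then (PySem.List.pyGet? max_pair_players 0).getD ""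
     else "TIE(" ++ PySem.Str.join "," max_pair_players ++ ")")
    =
    (let best := (PySem.List.max? ((tb.map Prod.snd).map
        (fun t => PySem.List.slice t none (some 2))) (fun t => t)).getD []
     let winners := (tb.filter
        (fun pt => PySem.List.slice pt.2 none (some 2) == best)).map Prod.fst
     if winners.length == 1 then (PySem.List.pyGet? winners 0).getD ""
     else "TIE(" ++ PySem.Str.join "," winners ++ ")")
  simp only [hFmap, hSmap, hm, hb, Option.getD_some]
  by_cases hone : (tb.filter (fun pt => (PySem.List.pyGet? pt.2 0).getD 0 == m)).length = 1
  case pos =>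
    obtain ⟨p, hp⟩ := List.length_eq_one_iff.mp hone
    have hp_mem : p ∈ tb.filter (fun pt => (PySem.List.pyGet? pt.2 0).getD 0 == m) := by
      rw [hp]; exact List.mem_singleton_self p
    have hp_tb : p ∈ tb := List.mem_of_mem_filter hp_mem
    have hp_m : (PySem.List.pyGet? p.2 0).getD 0 = m := by
      have := List.of_mem_filter hp_mem
      simpa using this
    have huniq : ∀ pt ∈ tb, (PySem.List.pyGet? pt.2 0).getD 0 = m → pt = p := by
      intro pt hpt hptm
      have : pt ∈ tb.filter (fun pt => (PySem.List.pyGet? pt.2 0).getD 0 == m) :=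
        List.mem_filter.mpr ⟨hpt, by simp [hptm]⟩
      rw [hp] at this
      simpa using this
    have hq_p : q = p := huniq q hq_tb (by rw [hq_g0]; omega)
    have hbest_p : best = PySem.List.slice p.2 none (some 2) := by rw [← hq_best, hq_p]
    have hW : tb.filter (fun pt => PySem.List.slice pt.2 none (some 2) == best)
        = tb.filter (fun pt => (PySem.List.pyGet? pt.2 0).getD 0 == m) := by
      refine List.filter_congr ?_
      intro pt hpt
      rw [Bool.eq_iff_iff, beq_iff_eq, beq_iff_eq]
      constructor
      · intro h
        obtain ⟨d, v, hd⟩ := List.exists_cons_of_ne_nil (hnn pt hpt)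
        rw [hs2cons pt d v hd, hbest_cons] at h
        have hdc : d = c := (List.cons.injEq _ _ _ _ ▸ h).1
        rw [hg0head pt d v hd]
        omega
      · intro h
        rw [huniq pt hpt h, ← hbest_p]
    rw [hW, hp]
    simp
  case neg =>
    -- at least two entries attain m, so every tiebreaker list has length ≥ 2
    have hpt0_mem : pt0 ∈ tb.filter (fun pt => (PySem.List.pyGet? pt.2 0).getD 0 == m) :=
      List.mem_filter.mpr ⟨hpt0_tb, by simp [hpt0_m]⟩
    have hnd_tb : tb.Nodup := List.Nodup.of_map Prod.fst hnd
    have hPnd : (tb.filter (fun pt => (PySem.List.pyGet? pt.2 0).getD 0 == m)).Nodup :=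
      List.Nodup.filter _ hnd_tb
    obtain ⟨x, y, hx_mem, hy_mem, hxy⟩ : ∃ x y,
        x ∈ tb.filter (fun pt => (PySem.List.pyGet? pt.2 0).getD 0 == m) ∧
        y ∈ tb.filter (fun pt => (PySem.List.pyGet? pt.2 0).getD 0 == m) ∧ x ≠ y := by
      rcases e : tb.filter (fun pt => (PySem.List.pyGet? pt.2 0).getD 0 == m) with _ | ⟨x, _ | ⟨y, rest⟩⟩
      · rw [e] at hpt0_mem; simp at hpt0_mem
      · rw [e] at hone; simp at hone
      · rw [e] at hPnd
        refine ⟨x, y, by rw [e]; simp, by rw [e]; simp, ?_⟩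
        intro hxy
        rcases hPnd with _ | ⟨hx, _⟩
        exact hx y (by simp) hxy
    have hx_tb : x ∈ tb := List.mem_of_mem_filter hx_mem
    have hy_tb : y ∈ tb := List.mem_of_mem_filter hy_mem
    have hx_m : (PySem.List.pyGet? x.2 0).getD 0 = m := by have := List.of_mem_filter hx_mem; simpa using this
    have hy_m : (PySem.List.pyGet? y.2 0).getD 0 = m := by have := List.of_mem_filter hy_mem; simpa using this
    have hxk : x.1 ≠ y.1 := fun hk => hxy (hkeys x hx_tb y hy_tb hk)
    have h2 : ∀ pt ∈ tb, 2 ≤ pt.2.length := by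
      refine hcond ⟨x, hx_tb, y, hy_tb, hxk, ?_, ?_⟩
      · show (PySem.List.pyGet? x.2 0).getD 0 = (PySem.List.pyGet? y.2 0).getD 0
        omega
      · intro rt hrt
        show (PySem.List.pyGet? rt.2 0).getD 0 ≤ (PySem.List.pyGet? x.2 0).getD 0
        have := hm_max rt hrt
        omega
    have htwo : ∀ pt ∈ tb, ∃ c d t2, pt.2 = c :: d :: t2 := by
      intro pt hpt
      obtain ⟨a, t1, h1⟩ := List.exists_cons_of_ne_nil (hnn pt hpt)
      have hl := h2 pt hpt
      rw [h1] at hl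
      simp only [List.length_cons] at hl
      have ht1 : t1 ≠ [] := by
        intro hh; rw [hh] at hl; simp at hl
      obtain ⟨b, t2, h2'⟩ := List.exists_cons_of_ne_nil ht1
      exact ⟨a, b, t2, by rw [h1, h2']⟩
    -- the key-membership test is the same as the first-component test
    have hcont : ∀ pt ∈ tb,
        (((tb.filter (fun pt => (PySem.List.pyGet? pt.2 0).getD 0 == m)).map Prod.fst).contains pt.1)
        = ((PySem.List.pyGet? pt.2 0).getD 0 == m) := by
      intro pt hpt
      rw [Bool.eq_iff_iff, beq_iff_eq]
      simp only [List.contains_eq_mem, decide_eq_true_eq, List.mem_map, List.mem_filter, beq_iff_eq]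
      constructor
      · rintro ⟨qt, ⟨hqt_tb, hqt_m⟩, hqt_k⟩
        rw [← hkeys qt hqt_tb pt hpt hqt_k]
        exact hqt_m
      · intro h
        exact ⟨pt, ⟨hpt, h⟩, rfl⟩
    have hA2 : tb.filter (fun pt =>
          ((tb.filter (fun pt => (PySem.List.pyGet? pt.2 0).getD 0 == m)).map Prod.fst).contains pt.1)
        = tb.filter (fun pt => (PySem.List.pyGet? pt.2 0).getD 0 == m) :=
      List.filter_congr hcont
    -- the maximal second component mp among the tied entries
    obtain ⟨mp, hmp⟩ : ∃ mp, PySem.List.max?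
        ((tb.filter (fun pt => (PySem.List.pyGet? pt.2 0).getD 0 == m)).map
          (fun pt => (PySem.List.pyGet? pt.2 1).getD 0)) (fun x => x) = some mp := by
      cases e : PySem.List.max? ((tb.filter (fun pt => (PySem.List.pyGet? pt.2 0).getD 0 == m)).map
          (fun pt => (PySem.List.pyGet? pt.2 1).getD 0)) (fun x => x) with
      | none =>
        rw [PySem.List.max?_eq_none_iff] at e
        simp only [List.map_eq_nil_iff] at e
        rw [e] at hpt0_mem
        simp at hpt0_mem
      | some v => exact ⟨v, rfl⟩
    have hmp_max : ∀ pt ∈ tb.filter (fun pt => (PySem.List.pyGet? pt.2 0).getD 0 == m),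
        (PySem.List.pyGet? pt.2 1).getD 0 ≤ mp := by
      intro pt hpt
      exact PySem.List.max?_isMax hmp _ (List.mem_map_of_mem hpt)
    obtain ⟨q', hq'_mem, hq'_mp⟩ : ∃ q' ∈ tb.filter (fun pt => (PySem.List.pyGet? pt.2 0).getD 0 == m),
        (PySem.List.pyGet? q'.2 1).getD 0 = mp := by
      obtain ⟨q', h1, h2⟩ := List.mem_map.mp (PySem.List.max?_mem hmp)
      exact ⟨q', h1, h2⟩
    -- best = [m, mp]
    obtain ⟨cq, dq, tq, hq2'⟩ := htwo q hq_tb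
    have hcq : cq = c := by rw [hq2] at hq2'; exact ((List.cons.injEq _ _ _ _ ▸ hq2').1).symm
    have hq_g1 : (PySem.List.pyGet? q.2 1).getD 0 = dq := hg1second q cq dq tq hq2'
    have hbest2 : best = [c, dq] := by
      rw [← hq_best, hs2two q cq dq tq hq2', hcq]
    have hq_P : q ∈ tb.filter (fun pt => (PySem.List.pyGet? pt.2 0).getD 0 == m) :=
      List.mem_filter.mpr ⟨hq_tb, by rw [hq_g0]; simp [hc_m]⟩
    have hq'_tb : q' ∈ tb := List.mem_of_mem_filter hq'_mem
    have hq'_m : (PySem.List.pyGet? q'.2 0).getD 0 = m := by have := List.of_mem_filter hq'_mem; simpa using this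
    obtain ⟨c2, d2, t2, hq'2⟩ := htwo q' hq'_tb
    have hc2 : c2 = m := by rw [hg0head q' c2 (d2 :: t2) hq'2] at hq'_m; omega
    have hdq : dq = mp := by
      have hle : dq ≤ mp := hq_g1 ▸ hmp_max q hq_P
      have hge : mp ≤ dq := by
        have h3 := hb_max q' hq'_tb
        rw [hs2two q' c2 d2 t2 hq'2, hbest2, hc_m, hc2] at h3
        have hd2 : d2 = mp := by rw [hg1second q' c2 d2 t2 hq'2] at hq'_mp; omega
        rw [hd2] at h3
        exact pv_le_head (pv_le_tail h3)
      omega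
    have hbestmp : best = [m, mp] := by rw [hbest2, hc_m, hdq]
    -- the winners filters agree
    have hWin : tb.filter (fun pt => PySem.List.slice pt.2 none (some 2) == best)
        = tb.filter (fun pt => ((PySem.List.pyGet? pt.2 1).getD 0 == mp) &&
            ((tb.filter (fun pt => (PySem.List.pyGet? pt.2 0).getD 0 == m)).map Prod.fst).contains pt.1) := by
      refine List.filter_congr ?_
      intro pt hpt
      rw [hcont pt hpt, Bool.eq_iff_iff]
      simp only [beq_iff_eq, Bool.and_eq_true]
      obtain ⟨c3, d3, t3, h3⟩ := htwo pt hpt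
      rw [hs2two pt c3 d3 t3 h3, hbestmp, hg0head pt c3 (d3 :: t3) h3, hg1second pt c3 d3 t3 h3]
      constructor
      · intro h
        simp only [List.cons.injEq, and_true] at h
        exact ⟨h.2, h.1⟩
      · rintro ⟨h1, h2⟩
        simp only [List.cons.injEq, and_true]
        exact ⟨h2, h1⟩
    -- both sides now compute the same list of winners
    have hfalse : ((tb.filter (fun pt => (PySem.List.pyGet? pt.2 0).getD 0 == m)).map Prod.fst).length ≠ 1 := by
      rw [List.length_map]; exact hone
    rw [hA2, hmp, Option.getD_some, hWin]
    rw [if_neg (by simpa using hfalse)]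

-- ===== VERDICT (by name: the statement is the Claim_ definition above) =====
theorem outs_tb_full_house_py_spec : Claim_equal_outs_tb_full_house_py := by
  intro tb _ hpre
  show outs_tb_full_house_py tb = outs_tb_full_house_py_alt tb
  exact outs_main tb hpre
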